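-- pv_equiv track=rewrite | github.com/ItsPaPPy/Gootloader-Javascript-Decrypter | decrypt-gootloader-js.py | alternating_unzip
-- ===== SOURCE A (Python) =====
-- def alternating_unzip(zipped):
--     ## Imagine a reverse card shuffle. It takes every other char
--     ## and adds it to the beginning. Then takes the others and
--     ## adds them to the end.
--     unzipped = ""
--     for index in range(len(zipped)):
--         if index & 1:
--             unzipped += zipped[index]
--         else:
--             unzipped = zipped[index] + unzipped
--     return unzipped
-- ===== SOURCE B (Python) =====
-- def alternating_unzip(zipped):
--     ## Partition the characters by index parity in one pass, then
--     ## reverse the even-index ones once and join: O(n) instead of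
--     ## A's repeated string prepends.
--     evens = []
--     odds = []
--     even = True
--     for ch in zipped:
--         (evens if even else odds).append(ch)
--         even = not even
--     evens.reverse()
--     return ''.join(evens + odds)
-- ===== Notes on version B (the rewrite author's own statement) =====
-- stated objective: faster
-- what changed: Replaces the grow-from-both-ends string accumulator (one string prepend/append per index) with a single-pass parity partition into two lists, one reverse, and one join.
import Mathlib
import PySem

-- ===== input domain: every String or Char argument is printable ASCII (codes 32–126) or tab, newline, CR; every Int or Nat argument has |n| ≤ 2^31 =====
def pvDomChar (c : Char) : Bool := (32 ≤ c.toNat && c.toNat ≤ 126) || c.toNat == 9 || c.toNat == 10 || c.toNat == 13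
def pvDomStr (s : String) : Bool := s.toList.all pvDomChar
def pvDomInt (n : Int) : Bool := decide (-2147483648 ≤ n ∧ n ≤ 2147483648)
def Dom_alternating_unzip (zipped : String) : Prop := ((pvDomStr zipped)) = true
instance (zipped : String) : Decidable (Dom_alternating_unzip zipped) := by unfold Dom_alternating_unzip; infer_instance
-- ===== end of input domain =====

-- B replaces A's grow-from-both-ends string accumulator with a one-pass parity
-- partition into two lists, one reverse and one join (measurably faster: A pays
-- a full string copy per prepend).


-- ===== PORT A =====
-- literal port of A's index loop: range(len(zipped)), bit test on the index,
-- append (odd index) or prepend (even index) the indexed character.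
-- the pyGetD default is never read: the index is always in range.
def alternating_unzip (zipped : String) : String :=
  String.ofList <|
    (PySem.List.pyRange 0 (PySem.List.len zipped.toList) 1).foldl
      (fun unzipped index =>
        if PySem.Int.band index 1 ≠ 0 then
          unzipped ++ [PySem.List.pyGetD zipped.toList index ' ']
        else
          PySem.List.pyGetD zipped.toList index ' ' :: unzipped)
      []

-- ===== PORT B =====
-- port of Source B: one pass over the characters partitioning by a parity toggle,
-- then reverse the even-index list once and join.
def alternating_unzip_alt (zipped : String) : String :=
  let res := zipped.toList.foldl
    (fun (st : List Char × List Char × Bool) ch =>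
      if st.2.2 then (st.1 ++ [ch], st.2.1, !st.2.2)
      else (st.1, st.2.1 ++ [ch], !st.2.2))
    ([], [], true)
  String.ofList (res.1.reverse ++ res.2.1)

-- ===== PRECONDITION & SPEC =====
def Spec_alternating_unzip (zipped : String) (out : String) : Prop := out = alternating_unzip_alt zipped
instance (zipped : String) (out : String) : Decidable (Spec_alternating_unzip zipped out) := by unfold Spec_alternating_unzip; infer_instance

-- ===== CLAIM (what is proved, stated in full; the proofs are below) =====
def Claim_equal_alternating_unzip : Prop := ∀ (zipped : String), Dom_alternating_unzip zipped → Spec_alternating_unzip zipped (alternating_unzip zipped)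

-- ===== LEMMAS AND PROOFS =====

-- characters of l at positions whose parity matches p (p = true: even positions)
def pvPick (p : Bool) : List Char → List Char
  | [] => []
  | c :: t => if p then c :: pvPick (!p) t else pvPick (!p) t

lemma pvPick_append_singleton (p : Bool) (l : List Char) (c : Char) :
    pvPick p (l ++ [c]) =
      pvPick p l ++ (if (l.length % 2 = 0) = p then [c] else []) := by
  induction l generalizing p with
  | nil => cases p <;> simp [pvPick]
  | cons a t ih =>
    cases p <;> simp [pvPick, ih, Nat.succ_mod_two_eq_zero_iff]

-- B's fold computes the parity partition
lemma pvB_fold (l : List Char) (re od : List Char) (p : Bool) :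
    l.foldl
      (fun (st : List Char × List Char × Bool) ch =>
        if st.2.2 then (st.1 ++ [ch], st.2.1, !st.2.2)
        else (st.1, st.2.1 ++ [ch], !st.2.2))
      (re, od, p)
    = (re ++ pvPick p l, od ++ pvPick (!p) l, if l.length % 2 = 0 then p else !p) := by
  induction l generalizing re od p with
  | nil => simp [pvPick]
  | cons c t ih =>
    cases p <;>
      simp [pvPick, ih, Nat.succ_mod_two_eq_zero_iff] <;>
      rcases Nat.mod_two_eq_zero_or_one t.length with h | h <;> simp [h]

-- A's loop over the first m indices builds rev(evens of take m) ++ odds of take m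
lemma pvA_loop (s : List Char) (m : Nat) (hm : m ≤ s.length) :
    ((List.range m).map Int.ofNat).foldl
      (fun unzipped index =>
        if PySem.Int.band index 1 ≠ 0 then
          unzipped ++ [PySem.List.pyGetD s index ' ']
        else
          PySem.List.pyGetD s index ' ' :: unzipped)
      []
    = (pvPick true (s.take m)).reverse ++ pvPick false (s.take m) := by
  induction m with
  | zero => simp [pvPick]
  | succ m ih =>
    have hm' : m ≤ s.length := Nat.le_of_succ_le hm
    have hlt : m < s.length := hm
    rw [List.range_succ, List.map_append, List.foldl_append, ih hm']
    have htake : s.take (m + 1) = s.take m ++ [s[m]] :=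
      List.take_succ_eq_append_getElem hlt
    have hget : PySem.List.pyGetD s (m : Int) ' ' = s[m] := by
      simp [PySem.List.pyGetD_natCast, List.getD, hlt]
    have hlen : (s.take m).length = m := List.length_take_of_le hm'
    have hband : PySem.Int.band (m : Int) 1 = ((m &&& 1 : Nat) : Int) := by
      exact_mod_cast PySem.Int.band_natCast m 1
    simp only [List.map_cons, List.map_nil, List.foldl_cons, List.foldl_nil,
      Int.ofNat_eq_natCast, hband, hget]
    rw [htake, pvPick_append_singleton, pvPick_append_singleton, hlen]
    rcases Nat.mod_two_eq_zero_or_one m with h | h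
    · have hand : (m &&& 1 : Nat) = 0 := by rw [Nat.and_one_is_mod]; omega
      rw [hand]; simp [h]
    · have hand : (m &&& 1 : Nat) = 1 := by rw [Nat.and_one_is_mod]; omega
      rw [hand]; simp [h]

-- ===== VERDICT (by name: the statement is the Claim_ definition above) =====
theorem alternating_unzip_spec : Claim_equal_alternating_unzip := by
  intro zipped _
  unfold Spec_alternating_unzip alternating_unzip alternating_unzip_alt
  have hlen : PySem.List.len zipped.toList = (zipped.toList.length : Int) := rfl
  rw [hlen, PySem.List.pyRange_zero_natCast]
  rw [show (fun (k : Nat) => (↑k : Int)) = Int.ofNat from rfl,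
    pvA_loop zipped.toList zipped.toList.length le_rfl, List.take_length]
  rw [pvB_fold]
  simp
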